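-- pv_equiv track=rewrite | github.com/vini-gpereira/algorithms-practice | python/minimum_appends_for_palindrome.py | solve
-- ===== SOURCE A (Python) =====
-- def solve(A):
--     n = len(A)
--     i = 0
--     j = n - 1
--     equals = 0
--     diff = 0
--
--     while i < j:
--         if A[i] != A[j]:
--             diff += 1 + equals
--             equals = 0
--             j = n - 1
--         else:
--             j -= 1
--             equals += 1
--         i += 1
--
--     return diff
-- ===== SOURCE B (Python) =====
-- def solve(A):
--     n = len(A)
--     k = 0
--     while k < n:
--         s = A[k:]
--         if s == s[::-1]:
--             return k
--         t = next(u for u in range(len(s) // 2) if s[u] != s[-1 - u])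
--         k += t + 1
--     return 0
-- ===== Notes on version B (the rewrite author's own statement) =====
-- stated objective: alternative
-- what changed: Replaces the single-pass two-pointer scan with accumulators (i, j, equals, diff) by a restart loop over candidate cut points: slice off the prefix, test the suffix against its reversal, and on failure jump past the first mismatching position; the accumulator bookkeeping disappears.
import Mathlib
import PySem

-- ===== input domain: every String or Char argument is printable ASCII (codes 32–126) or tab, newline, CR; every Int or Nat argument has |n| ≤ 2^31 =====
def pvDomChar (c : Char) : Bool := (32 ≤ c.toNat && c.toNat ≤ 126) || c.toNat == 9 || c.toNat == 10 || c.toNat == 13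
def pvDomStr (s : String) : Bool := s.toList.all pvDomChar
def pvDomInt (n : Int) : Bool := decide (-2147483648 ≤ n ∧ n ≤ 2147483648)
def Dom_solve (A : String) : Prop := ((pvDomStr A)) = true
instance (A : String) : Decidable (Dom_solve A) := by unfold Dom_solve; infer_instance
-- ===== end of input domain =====

-- B replaces A's accumulating two-pointer scan by a restart loop that slices off the
-- prefix, tests the suffix against its reversal, and skips past the first mismatch
-- (objective: alternative decomposition; same greedy result, not claimed faster).

-- ===== PORT A =====
-- the while loop of A; fuel bounds the iterations (i strictly increases, i < n-1)
def solveLoopA (l : List Char) (n : Int) : Nat → Int → Int → Int → Int → Int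
  | 0, _, _, _, diff => diff
  | f+1, i, j, equals, diff =>
    if i < j then
      if PySem.List.pyGet? l i ≠ PySem.List.pyGet? l j then
        solveLoopA l n f (i+1) (n-1) 0 (diff + 1 + equals)
      else
        solveLoopA l n f (i+1) (j-1) (equals+1) diff
    else diff

def solve (A : String) : Int :=
  solveLoopA A.toList (A.toList.length : Int) (A.toList.length + 1) 0 ((A.toList.length : Int) - 1) 0 0

-- ===== PORT B =====
-- the while loop of B; each pass either returns or increases k by t+1 ≥ 1 (fuel = n+1)
def solveLoopB (l : List Char) : Nat → Int → Int
  | 0, _ => 0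
  | f+1, k =>
    if k < (l.length : Int) then
      let s := PySem.List.slice l (some k) none               -- s = A[k:]
      if s = s.reverse then k                                 -- s == s[::-1]
      else
        -- next(u for u in range(len(s) // 2) if s[u] != s[-1 - u])
        match (PySem.List.pyRange 0 (PySem.Int.floordiv (s.length : Int) 2) 1).find?
            (fun u => decide (PySem.List.pyGet? s u ≠ PySem.List.pyGet? s (-1 - u))) with
        | some t => solveLoopB l f (k + t + 1)
        | none => 0                                           -- unreachable: a non-palindrome has a mismatch
    else 0

def solve_alt (A : String) : Int := solveLoopB A.toList (A.toList.length + 1) 0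

-- ===== PRECONDITION & SPEC =====
def Spec_solve (A : String) (out : Int) : Prop := out = solve_alt A
instance (A : String) (out : Int) : Decidable (Spec_solve A out) := by unfold Spec_solve; infer_instance

-- ===== CLAIM (what is proved, stated in full; the proofs are below) =====
def Claim_equal_solve : Prop := ∀ (A : String), Dom_solve A → Spec_solve A (solve A)

-- ===== LEMMAS AND PROOFS =====

-- a list equals its reversal iff the first half mirrors the second half
lemma pal_iff_half (s : List Char) :
    s = s.reverse ↔ ∀ u : Nat, u < s.length / 2 → s[u]? = s[s.length - 1 - u]? := by
  constructor
  · intro h u hu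
    conv_lhs => rw [h]
    rw [List.getElem?_reverse (by omega)]
  · intro h
    apply List.ext_getElem?
    intro i
    by_cases hi : i < s.length
    · rw [List.getElem?_reverse (by simpa using hi)]
      by_cases h1 : i < s.length / 2
      · exact h i h1
      · by_cases h2 : s.length - 1 - i < s.length / 2
        · have := h (s.length - 1 - i) h2
          have e : s.length - 1 - (s.length - 1 - i) = i := by omega
          rw [e] at this
          exact this.symm
        · have e : s.length - 1 - i = i := by omega
          rw [e]
    · rw [List.getElem?_eq_none (by omega), List.getElem?_eq_none (by rw [List.length_reverse]; omega)]

-- the suffix l.drop k mirrors iff positions match around the ends of l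
lemma drop_pal_iff (l : List Char) (k : Nat) (hk : k ≤ l.length) :
    l.drop k = (l.drop k).reverse ↔
      ∀ u : Nat, u < (l.length - k) / 2 → l[k + u]? = l[l.length - 1 - u]? := by
  rw [pal_iff_half]
  simp only [List.length_drop, List.getElem?_drop]
  constructor
  · intro h u hu
    have := h u hu
    have e : k + (l.length - k - 1 - u) = l.length - 1 - u := by omega
    rwa [e] at this
  · intro h u hu
    have := h u hu
    have e : k + (l.length - k - 1 - u) = l.length - 1 - u := by omega
    rwa [← e] at this

-- find? on range(a,b) returns the first element satisfying the predicate
lemma find?_pyRange_first (p : Int → Bool) :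
    ∀ (m : Nat) (a b t : Int), a ≤ t → t < b → (t - a).toNat = m → p t = true →
      (∀ x, a ≤ x → x < t → p x = false) →
      (PySem.List.pyRange a b 1).find? p = some t := by
  intro m
  induction m with
  | zero =>
    intro a b t hat htb hm hpt _
    have : a = t := by omega
    subst this
    rw [PySem.List.pyRange_one_cons (by omega)]
    exact List.find?_cons_of_pos hpt
  | succ m ih =>
    intro a b t hat htb hm hpt hmin
    have ha : a < t := by omega
    rw [PySem.List.pyRange_one_cons (by omega)]
    rw [List.find?_cons_of_neg (by simp [hmin a le_rfl ha])]
    exact ih (a+1) b t (by omega) htb (by omega) hpt (fun x h1 h2 => hmin x (by omega) h2)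

-- s[-1-u] for 0 ≤ u < len s
lemma pyGet?_neg_one_sub (s : List Char) (u : Nat) (hu : u < s.length) :
    PySem.List.pyGet? s (-1 - (u : Int)) = s[s.length - 1 - u]? := by
  have e : (-1 - (u : Int)) = -(((u + 1 : Nat) : Int)) := by push_cast; ring
  have h2 := PySem.List.pyGet?_neg_natCast (xs := s) (k := u + 1) (by omega) (by omega)
  rw [e, h2]
  congr 1
  omega

-- len(s) // 2 on a natural length
lemma floordiv_two_natCast (m : Nat) :
    PySem.Int.floordiv (m : Int) 2 = ((m / 2 : Nat) : Int) := by
  simp only [PySem.Int.floordiv]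
  rw [Int.fdiv_eq_ediv]
  norm_num

-- B's loop returns k as soon as the suffix at k mirrors
lemma loopB_pal (l : List Char) (f k : Nat) (hk : k < l.length)
    (hpal : l.drop k = (l.drop k).reverse) :
    solveLoopB l (f + 1) (k : Int) = k := by
  have hs : PySem.List.slice l (some (k : Int)) none = l.drop k :=
    PySem.List.slice_from_natCast l k
  simp only [solveLoopB, hs]
  rw [if_pos (by exact_mod_cast hk), if_pos hpal]

-- main correspondence: A's loop state (i = k+t, j = n-1-t, equals = t, diff = k),
-- where positions below t already matched, computes the same value as B's loop at k
lemma loopAB (l : List Char) :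
    ∀ (fA fB k t : Nat),
      k < l.length →
      (∀ s : Nat, s < t → l[k + s]? = l[l.length - 1 - s]?) →
      l.length ≤ fA + k + t →
      l.length + 1 ≤ fB + k →
      solveLoopA l (l.length : Int) fA ((k + t : Nat) : Int) ((l.length : Int) - 1 - t) t k
        = solveLoopB l fB (k : Int) := by
  intro fA
  induction fA with
  | zero =>
    intro fB k t hk hmatch hfA hfB
    have hpal : l.drop k = (l.drop k).reverse := by
      rw [drop_pal_iff l k (by omega)]
      intro u hu; exact hmatch u (by omega)
    obtain ⟨f, rfl⟩ : ∃ f, fB = f + 1 := ⟨fB - 1, by omega⟩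
    rw [loopB_pal l f k hk hpal]
    rfl
  | succ f ih =>
    intro fB k t hk hmatch hfA hfB
    obtain ⟨fb, rfl⟩ : ∃ fb, fB = fb + 1 := ⟨fB - 1, by omega⟩
    by_cases hg : ((k + t : Nat) : Int) < (l.length : Int) - 1 - t
    · -- loop guard holds: compare l[k+t] with l[n-1-t]
      have hlt : k + t < l.length := by omega
      have htn : t ≤ l.length - 1 := by omega
      have hjt : ((l.length : Int) - 1 - t) = ((l.length - 1 - t : Nat) : Int) := by
        omega
      by_cases hne : l[k + t]? = l[l.length - 1 - t]?
      · -- equal branch: advance t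
        simp only [solveLoopA, if_pos hg]
        rw [if_neg (by rw [hjt]; simp only [PySem.List.pyGet?_natCast, not_not]; exact hne)]
        have e1 : ((k + t : Nat) : Int) + 1 = ((k + (t+1) : Nat) : Int) := by push_cast; ring
        have e2 : (l.length : Int) - 1 - (t : Int) - 1 = (l.length : Int) - 1 - ((t+1 : Nat) : Int) := by
          omega
        have e3 : (t : Int) + 1 = ((t + 1 : Nat) : Int) := by omega
        rw [e1, e2, e3]
        exact ih (fb+1) k (t+1)
          hk
          (by intro s hs
              rcases Nat.lt_succ_iff_lt_or_eq.mp hs with h | h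
              · exact hmatch s h
              · subst h; exact hne)
          (by omega) (by omega)
      · -- mismatch branch: both loops restart at k' = k + t + 1
        have ht2 : t < (l.length - k) / 2 := by omega
        have hk' : k + t + 1 < l.length := by omega
        -- A side
        simp only [solveLoopA, if_pos hg]
        rw [if_pos (by rw [hjt]; simp only [PySem.List.pyGet?_natCast]; exact hne)]
        have hA := ih (fb) (k + t + 1) 0 hk' (by intro s hs; omega) (by omega) (by omega)
        have c1 : ((k + t + 1 + 0 : Nat) : Int) = ((k + t : Nat) : Int) + 1 := by push_cast; ring
        have c2 : (l.length : Int) - 1 - ((0 : Nat) : Int) = (l.length : Int) - 1 := by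
          norm_num
        rw [c1, c2] at hA
        simp only [Nat.cast_zero] at hA
        rw [show (k : Int) + 1 + (t : Int) = ((k + t : Nat) : Int) + 1 by push_cast; ring]
        rw [hA]
        -- B side: unfold one step of loopB
        have hs : PySem.List.slice l (some (k : Int)) none = l.drop k :=
          PySem.List.slice_from_natCast l k
        have hnotpal : ¬ (l.drop k = (l.drop k).reverse) := by
          rw [drop_pal_iff l k (by omega)]
          intro hc
          exact hne (hc t ht2)
        have hlen : (l.drop k).length = l.length - k := List.length_drop
        have hfd : PySem.Int.floordiv (((l.drop k).length : Nat) : Int) 2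
            = (((l.length - k) / 2 : Nat) : Int) := by
          rw [hlen, floordiv_two_natCast]
        have hfind :
            (PySem.List.pyRange 0 (PySem.Int.floordiv (((l.drop k).length : Nat) : Int) 2) 1).find?
              (fun u => decide (PySem.List.pyGet? (l.drop k) u ≠ PySem.List.pyGet? (l.drop k) (-1 - u)))
              = some (t : Int) := by
          rw [hfd]
          apply find?_pyRange_first _ t 0 _ (t : Int) (by omega) (by exact_mod_cast ht2) (by omega)
          · -- predicate holds at t
            have hut : t < (l.drop k).length := by omega
            simp only [PySem.List.pyGet?_natCast, pyGet?_neg_one_sub (l.drop k) t hut]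
            rw [hlen]
            simp only [List.getElem?_drop]
            have e : k + (l.length - k - 1 - t) = l.length - 1 - t := by omega
            rw [e]
            simpa using hne
          · -- predicate fails below t
            intro x hx1 hx2
            obtain ⟨u, rfl⟩ : ∃ u : Nat, x = (u : Int) := ⟨x.toNat, by omega⟩
            have hut : u < t := by exact_mod_cast hx2
            have huu : u < (l.drop k).length := by omega
            simp only [PySem.List.pyGet?_natCast, pyGet?_neg_one_sub (l.drop k) u huu]
            rw [hlen]
            simp only [List.getElem?_drop]
            have e : k + (l.length - k - 1 - u) = l.length - 1 - u := by omega
            rw [e]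
            simp [hmatch u hut]
        show solveLoopB l fb ((k + t : Nat) + 1 : Int) = solveLoopB l (fb + 1) (k : Int)
        conv_rhs => rw [solveLoopB]
        rw [if_pos (by exact_mod_cast hk)]
        simp only [hs]
        rw [if_neg hnotpal, hfind]
        congr 1
    · -- guard fails: A returns k, and the suffix at k is a palindrome so B returns k too
      have hpal : l.drop k = (l.drop k).reverse := by
        rw [drop_pal_iff l k (by omega)]
        intro u hu; exact hmatch u (by omega)
      rw [loopB_pal l fb k hk hpal]
      simp only [solveLoopA, if_neg hg]

-- ===== VERDICT (by name: the statement is the Claim_ definition above) =====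
theorem solve_spec : Claim_equal_solve := by
  intro A _
  unfold Spec_solve solve solve_alt
  rcases Nat.eq_zero_or_pos A.toList.length with h0 | hpos
  · have hl : A.toList = [] := List.length_eq_zero_iff.mp h0
    norm_num [solveLoopA, solveLoopB, hl]
  · have h := loopAB A.toList (A.toList.length + 1) (A.toList.length + 1) 0 0
      hpos (by intro s hs; omega) (by omega) (by omega)
    simpa using h
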